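-- pv_equiv track=rewrite | github.com/iamaleko/leetcode | 3372-maximize-the-number-of-target-nodes-after-connecting-trees-i/3372-maximize-the-number-of-target-nodes-after-connecting-trees-i.py | indexTree
-- ===== SOURCE A (Python) =====
-- from typing import Dict, Set
--
-- def indexTree(tree: Dict[int, Set[int]], n: int, k: int) -> Dict[int, int]:
--   visited = set()
--   def dfs(node: int, k: int) -> int:
--     ans = 1
--     if k > 0:
--       visited.add(node)
--       for sub in tree[node]:
--         if sub not in visited:
--           ans += dfs(sub, k - 1)
--       visited.remove(node)
--     return ans
--   return {node: dfs(node, k) for node in range(n)}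
-- ===== SOURCE B (Python) =====
-- from typing import Dict, Set
--
-- def indexTree(tree: Dict[int, Set[int]], n: int, k: int) -> Dict[int, int]:
--   # Iterative level-by-level frontier of (head, path) pairs instead of recursive DFS.
--   res = {}
--   for root in range(n):
--     count = 1
--     frontier = [(root, (root,))]
--     d = 0
--     while frontier and d < k:
--       nxt = []
--       for head, path in frontier:
--         for nb in tree[head]:
--           if nb not in path:
--             nxt.append((nb, path + (nb,)))
--       count += len(nxt)
--       frontier = nxt
--       d += 1
--     res[root] = count
--   return res
-- ===== Notes on version B (the rewrite author's own statement) =====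
-- stated objective: alternative
-- what changed: A's recursive DFS with a shared mutated visited-set is replaced by an iterative level-by-level frontier of (head, path) pairs: a while loop pops a whole level, extends each path by unvisited neighbours, and adds the new level's size to the count.
-- outside the precondition, e.g. on indexTree({0: set(), 5: {7}}, 1, 2): A returns {0: 1}, B returns {0: 1}
import Mathlib
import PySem

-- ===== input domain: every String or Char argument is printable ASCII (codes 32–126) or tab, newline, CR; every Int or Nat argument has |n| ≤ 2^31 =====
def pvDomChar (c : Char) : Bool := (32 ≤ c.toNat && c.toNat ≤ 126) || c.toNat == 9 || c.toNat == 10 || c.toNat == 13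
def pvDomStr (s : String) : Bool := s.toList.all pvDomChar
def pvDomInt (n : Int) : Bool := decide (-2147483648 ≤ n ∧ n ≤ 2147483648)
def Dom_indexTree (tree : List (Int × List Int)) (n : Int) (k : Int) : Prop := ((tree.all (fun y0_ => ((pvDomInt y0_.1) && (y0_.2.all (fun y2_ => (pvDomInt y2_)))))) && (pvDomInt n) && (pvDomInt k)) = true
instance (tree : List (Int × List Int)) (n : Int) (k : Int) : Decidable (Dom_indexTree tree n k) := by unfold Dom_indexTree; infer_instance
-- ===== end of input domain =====

-- B replaces A's recursive path-DFS by an iterative level-by-level frontier of (head, path) pairs; alternative decomposition, same exact counts.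

-- ===== PORT A =====
-- dfs(node, k) with the restored `visited` set modelled as the explicit list `visited`;
-- during the neighbour loop the Python set is `visited ∪ {node}`, here `node :: visited`.
def dfsA (tree : List (Int × List Int)) (node : Int) (k : Int) (visited : List Int) : Int :=
  if _h : 0 < k then
    ((PySem.Dict.mk tree).getD node []).foldl
      (fun ans sub =>
        if sub ∈ (node :: visited) then ans
        else ans + dfsA tree sub (k - 1) (node :: visited)) 1
  else 1
termination_by k.toNat
decreasing_by omega

def indexTree (tree : List (Int × List Int)) (n : Int) (k : Int) : List (Int × Int) :=
  (PySem.List.pyRange 0 n 1).map (fun node => (node, dfsA tree node k []))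

-- ===== PORT B =====
-- one round of the while loop: extend every (head, path) by each neighbour not on its path
def stepB (tree : List (Int × List Int)) (frontier : List (Int × List Int)) : List (Int × List Int) :=
  frontier.foldl (fun nxt hp =>
    ((PySem.Dict.mk tree).getD hp.1 []).foldl
      (fun nxt2 nb => if nb ∉ hp.2 then nxt2 ++ [(nb, hp.2 ++ [nb])] else nxt2) nxt) []

-- `while frontier and d < k: …`
def loopB (tree : List (Int × List Int)) (frontier : List (Int × List Int))
    (count d k : Int) : Int :=
  if _h : frontier ≠ [] ∧ d < k then
    let nxt := stepB tree frontier
    loopB tree nxt (count + nxt.length) (d + 1) k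
  else count
termination_by (k - d).toNat
decreasing_by omega

def indexTree_alt (tree : List (Int × List Int)) (n : Int) (k : Int) : List (Int × Int) :=
  (PySem.List.pyRange 0 n 1).map (fun root => (root, loopB tree [(root, [root])] 1 0 k))

-- ===== PRECONDITION & SPEC =====
-- Pre_ excludes exactly the KeyError inputs of A (a `tree[node]` lookup of a missing key), stated in
-- closed form; for k ≥ 2 it is mildly narrower than A's exact no-raise set: it requires every listed
-- neighbour to be a key even when that neighbour is unreachable from range(n) — on such excluded
-- inputs A still returns and B returns the same value (see cites).
def Pre_indexTree (tree : List (Int × List Int)) (n : Int) (k : Int) : Prop :=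
  k ≤ 0 ∨ n ≤ 0 ∨
    (n ≤ (tree.length : Int) ∧
     ((PySem.List.pyRange 0 n 1).all (fun i => (PySem.Dict.mk tree).contains i)) = true ∧
     (k = 1 ∨ (tree.all (fun p => p.2.all (fun v => (PySem.Dict.mk tree).contains v))) = true))
instance (tree : List (Int × List Int)) (n : Int) (k : Int) : Decidable (Pre_indexTree tree n k) := by
  unfold Pre_indexTree; infer_instance

def pvWitness_indexTree : (List (Int × List Int)) × Int × Int :=
  ([(0, [1]), (1, [0, 2]), (2, [1])], 3, 2)

def Spec_indexTree (tree : List (Int × List Int)) (n : Int) (k : Int) (out : List (Int × Int)) : Prop := out = indexTree_alt tree n k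
instance (tree : List (Int × List Int)) (n : Int) (k : Int) (out : List (Int × Int)) : Decidable (Spec_indexTree tree n k out) := by unfold Spec_indexTree; infer_instance

-- ===== CLAIM (what is proved, stated in full; the proofs are below) =====
def Claim_equal_indexTree : Prop := ∀ (tree : List (Int × List Int)) (n : Int) (k : Int), Dom_indexTree tree n k → Pre_indexTree tree n k → Spec_indexTree tree n k (indexTree tree n k)

-- ===== LEMMAS AND PROOFS =====

-- dfsA only depends on the membership of `node :: visited`
theorem dfsA_congr (m : Nat) (tree : List (Int × List Int)) :
    ∀ (node k : Int) (v v' : List Int), k.toNat ≤ m →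
      (∀ x, x ∈ node :: v ↔ x ∈ node :: v') →
      dfsA tree node k v = dfsA tree node k v' := by
  induction m with
  | zero =>
    intro node k v v' hm _
    rw [dfsA, dfsA]
    have : ¬ 0 < k := by omega
    simp [this]
  | succ m ih =>
    intro node k v v' hm hmem
    rw [dfsA, dfsA]
    by_cases hk : 0 < k
    · simp only [hk, dif_pos]
      apply PySem.List.foldl_congr_mem
      intro ans sub _
      by_cases hs : sub ∈ node :: v'
      · have hv : sub ∈ node :: v := (hmem sub).mpr hs
        simp [hv, hs]
      · have hv : sub ∉ node :: v := fun hx => hs ((hmem sub).mp hx)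
        simp only [hv, hs, if_neg, not_false_iff]
        congr 1
        apply ih sub (k - 1) (node :: v) (node :: v') (by omega)
        intro x
        have := hmem x
        simp only [List.mem_cons] at *
        tauto
    · simp [hk]

theorem dfsA_nonpos (tree : List (Int × List Int)) (node k : Int) (v : List Int)
    (hk : ¬ 0 < k) : dfsA tree node k v = 1 := by
  rw [dfsA]; simp [hk]

-- the extensions of one frontier entry
def extB (tree : List (Int × List Int)) (hp : Int × List Int) : List (Int × List Int) :=
  (((PySem.Dict.mk tree).getD hp.1 []).filter (fun nb => decide (nb ∉ hp.2))).map
    (fun nb => (nb, hp.2 ++ [nb]))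

theorem stepB_eq_flatMap (tree : List (Int × List Int)) (frontier : List (Int × List Int)) :
    stepB tree frontier = frontier.flatMap (extB tree) := by
  unfold stepB
  have h : ∀ (acc : List (Int × List Int)), ∀ hp ∈ frontier,
      ((PySem.Dict.mk tree).getD hp.1 []).foldl
        (fun nxt2 nb => if nb ∉ hp.2 then nxt2 ++ [(nb, hp.2 ++ [nb])] else nxt2) acc
      = acc ++ extB tree hp := by
    intro acc hp _
    rw [PySem.List.foldl_append_ite (fun nb => nb ∉ hp.2) (fun nb => (nb, hp.2 ++ [nb]))]
    rfl
  have h2 := PySem.List.foldl_congr_mem frontier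
    (fun nxt hp => ((PySem.Dict.mk tree).getD hp.1 []).foldl
      (fun nxt2 nb => if nb ∉ hp.2 then nxt2 ++ [(nb, hp.2 ++ [nb])] else nxt2) nxt)
    (fun nxt hp => nxt ++ extB tree hp) ([] : List (Int × List Int)) h
  rw [h2, PySem.List.foldl_append_eq_flatMap]
  simp

theorem sum_ite_filter (l : List Int) (p : Int → Prop) [DecidablePred p] (f : Int → Int) :
    (l.map (fun x => if p x then f x else 0)).sum
      = (((l.filter (fun x => decide (p x))).map f).sum) := by
  induction l with
  | nil => rfl
  | cons x xs ih =>
    by_cases hx : p x <;> simp [hx, ih]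

-- one frontier entry with head on its path: dfs count minus one = total over its extensions
theorem dfsA_entry (tree : List (Int × List Int)) (h : Int) (p : List Int) (r : Int)
    (hr : 0 < r) (hhp : h ∈ p) :
    dfsA tree h r p - 1
      = ((extB tree (h, p)).map (fun hp' => dfsA tree hp'.1 (r - 1) hp'.2)).sum := by
  rw [dfsA]
  simp only [hr, dif_pos]
  have hcongr : ∀ (ans sub : Int), sub ∈ (PySem.Dict.mk tree).getD h [] →
      (if sub ∈ (h :: p) then ans else ans + dfsA tree sub (r - 1) (h :: p))
      = ans + (if sub ∉ p then dfsA tree sub (r - 1) (p ++ [sub]) else 0) := by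
    intro ans sub _
    by_cases hs : sub ∈ p
    · have : sub ∈ h :: p := List.mem_cons_of_mem _ hs
      simp [this, hs]
    · have hnc : sub ∉ h :: p := by
        intro hx
        rcases List.mem_cons.mp hx with rfl | hx
        · exact hs hhp
        · exact hs hx
      simp only [hnc, hs, if_neg, not_false_iff, if_pos]
      congr 1
      apply dfsA_congr (r - 1).toNat tree sub (r - 1) (h :: p) (p ++ [sub]) le_rfl
      intro x
      constructor
      · intro hx
        rcases List.mem_cons.mp hx with rfl | hx
        · exact List.mem_cons_self
        · rcases List.mem_cons.mp hx with rfl | hx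
          · exact List.mem_cons_of_mem _ (List.mem_append_left _ hhp)
          · exact List.mem_cons_of_mem _ (List.mem_append_left _ hx)
      · intro hx
        rcases List.mem_cons.mp hx with rfl | hx
        · exact List.mem_cons_self
        · rcases List.mem_append.mp hx with hx | hx
          · exact List.mem_cons_of_mem _ (List.mem_cons_of_mem _ hx)
          · have : x = sub := by simpa using hx
            subst this
            exact List.mem_cons_self
  have h2 := PySem.List.foldl_congr_mem ((PySem.Dict.mk tree).getD h [])
    (fun ans sub => if sub ∈ (h :: p) then ans else ans + dfsA tree sub (r - 1) (h :: p))
    (fun ans sub => ans + (if sub ∉ p then dfsA tree sub (r - 1) (p ++ [sub]) else 0))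
    (1 : Int) hcongr
  rw [h2]
  rw [PySem.List.foldl_add ((PySem.Dict.mk tree).getD h [])
    (fun sub => if sub ∉ p then dfsA tree sub (r - 1) (p ++ [sub]) else 0) 1]
  rw [sum_ite_filter _ (fun sub => sub ∉ p) (fun sub => dfsA tree sub (r - 1) (p ++ [sub]))]
  unfold extB
  rw [List.map_map]
  ring_nf
  rfl

-- (map (g · − 1)).sum = (map g).sum − length, over Int
theorem sum_map_sub_one (l : List (Int × List Int)) (g : Int × List Int → Int) :
    (l.map (fun hp => g hp - 1)).sum = (l.map g).sum - l.length := by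
  induction l with
  | nil => simp
  | cons x xs ih => simp [ih]; ring

-- loop invariant: loopB adds, to count, (dfsA − 1) summed over the frontier at remaining depth k − d
theorem loopB_eq (m : Nat) (tree : List (Int × List Int)) :
    ∀ (k d : Int) (frontier : List (Int × List Int)) (count : Int),
      (k - d).toNat ≤ m →
      (∀ hp ∈ frontier, hp.1 ∈ hp.2) →
      loopB tree frontier count d k
        = count + ((frontier.map (fun hp => dfsA tree hp.1 (k - d) hp.2 - 1)).sum) := by
  induction m with
  | zero =>
    intro k d frontier count hm hinv
    have hk : ¬ d < k := by omega
    rw [loopB, dif_neg (by simp [hk])]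
    have : (frontier.map (fun hp => dfsA tree hp.1 (k - d) hp.2 - 1)) =
        frontier.map (fun _ => 0) := by
      apply List.map_congr_left
      intro hp _
      rw [dfsA_nonpos tree hp.1 (k - d) hp.2 (by omega)]
      ring
    rw [this]
    simp
  | succ m ih =>
    intro k d frontier count hm hinv
    rw [loopB]
    by_cases hc : frontier ≠ [] ∧ d < k
    · rw [dif_pos hc]
      have hinv' : ∀ hp ∈ stepB tree frontier, hp.1 ∈ hp.2 := by
        intro hp hmem
        rw [stepB_eq_flatMap] at hmem
        simp only [List.mem_flatMap] at hmem
        obtain ⟨q, _, hq⟩ := hmem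
        unfold extB at hq
        simp only [List.mem_map, List.mem_filter] at hq
        obtain ⟨nb, _, rfl⟩ := hq
        simp
      rw [ih k (d + 1) (stepB tree frontier) _ (by omega) hinv']
      have hd1 : k - (d + 1) = k - d - 1 := by ring
      rw [hd1]
      have e2 : ((stepB tree frontier).map (fun hp => dfsA tree hp.1 (k - d - 1) hp.2)).sum
          = (frontier.map (fun hp =>
              ((extB tree hp).map (fun hp' => dfsA tree hp'.1 (k - d - 1) hp'.2)).sum)).sum := by
        rw [stepB_eq_flatMap, List.map_flatMap, List.flatMap_def, List.sum_flatten, List.map_map]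
        rfl
      have e3 : (frontier.map (fun hp => dfsA tree hp.1 (k - d) hp.2 - 1))
          = frontier.map (fun hp =>
              ((extB tree hp).map (fun hp' => dfsA tree hp'.1 (k - d - 1) hp'.2)).sum) := by
        apply List.map_congr_left
        intro hp hpmem
        have := dfsA_entry tree hp.1 hp.2 (k - d) (by omega) (hinv hp hpmem)
        simpa using this
      rw [e3, sum_map_sub_one, e2]
      ring
    · rw [dif_neg hc]
      rcases not_and_or.mp hc with hf | hk
      · rw [not_not] at hf
        subst hf; simp
      · have : (frontier.map (fun hp => dfsA tree hp.1 (k - d) hp.2 - 1)) =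
            frontier.map (fun _ => 0) := by
          apply List.map_congr_left
          intro hp _
          rw [dfsA_nonpos tree hp.1 (k - d) hp.2 (by omega)]
          ring
        rw [this]
        simp

theorem loopB_root (tree : List (Int × List Int)) (root k : Int) :
    loopB tree [(root, [root])] 1 0 k = dfsA tree root k [] := by
  rw [loopB_eq (k - 0).toNat tree k 0 [(root, [root])] 1 le_rfl (by simp)]
  have h0 : dfsA tree root k [root] = dfsA tree root k [] := by
    apply dfsA_congr k.toNat tree root k [root] [] le_rfl
    intro x; simp
  simp only [List.map_cons, List.map_nil, List.sum_cons, List.sum_nil, sub_zero]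
  rw [h0]
  ring

-- ===== VERDICT (by name: the statement is the Claim_ definition above) =====
theorem indexTree_spec : Claim_equal_indexTree := by
  intro tree n k _ _
  unfold Spec_indexTree indexTree indexTree_alt
  apply List.map_congr_left
  intro node _
  rw [loopB_root]
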